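-- pv_equiv track=rewrite | github.com/AlexanderVDF/EXO | scripts/generate_toc.py | find_header_end
-- ===== SOURCE A (Python) =====
-- def find_header_end(lines: list[str]) -> int:
--     """Trouve la position après le header (breadcrumb, titre, sous-titre, séparateur).
--
--     Retourne l'index de la ligne après laquelle insérer la TOC.
--     """
--     found_title = False
--     last_header_line = 0
--
--     for i, line in enumerate(lines):
--         stripped = line.strip()
--         # Breadcrumb
--         if stripped.startswith('>') and not found_title:
--             last_header_line = i
--             continue
--         # Premier titre h1
--         if not found_title and stripped.startswith('# '):
--             found_title = True
--             last_header_line = i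
--             continue
--         if found_title:
--             # Sous-titres, blockquotes, métadonnées dans le bloc header
--             if stripped.startswith('>') or stripped.startswith('### ') or stripped == '':
--                 last_header_line = i
--                 continue
--             # Séparateur --- marque la fin nette du header
--             if stripped == '---':
--                 return i + 1
--             # Tout autre contenu → fin du header
--             break
--
--     return last_header_line + 1
-- ===== SOURCE B (Python) =====
-- def find_header_end(lines: list[str]) -> int:
--     """Declarative search: first h1 index, last breadcrumb index, and the first
--     non-header line after the title, computed by find-first / find-last queries
--     instead of a stateful scan."""
--     strips = [l.strip() for l in lines]
--
--     def qual(s):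
--         return s.startswith('>') or s.startswith('### ') or s == ''
--
--     t = next((i for i, s in enumerate(strips) if s.startswith('# ')), None)
--     if t is None:
--         bc = [i for i, s in enumerate(strips) if s.startswith('>')]
--         return (bc[-1] + 1) if bc else 1
--     tail = strips[t + 1:]
--     k = next((k for k, s in enumerate(tail) if not qual(s)), None)
--     if k is None:
--         return len(lines)
--     return t + k + 2 if tail[k] == '---' else t + k + 1
-- ===== Notes on version B (the rewrite author's own statement) =====
-- stated objective: alternative
-- what changed: Replaces A's stateful flag-driven scan (found_title flag + last_header_line accumulator) by three declarative queries on a precomputed stripped list: first index of an h1 title, last breadcrumb index when there is none, and the first non-header line after the title, combined by index arithmetic.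
import Mathlib
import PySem

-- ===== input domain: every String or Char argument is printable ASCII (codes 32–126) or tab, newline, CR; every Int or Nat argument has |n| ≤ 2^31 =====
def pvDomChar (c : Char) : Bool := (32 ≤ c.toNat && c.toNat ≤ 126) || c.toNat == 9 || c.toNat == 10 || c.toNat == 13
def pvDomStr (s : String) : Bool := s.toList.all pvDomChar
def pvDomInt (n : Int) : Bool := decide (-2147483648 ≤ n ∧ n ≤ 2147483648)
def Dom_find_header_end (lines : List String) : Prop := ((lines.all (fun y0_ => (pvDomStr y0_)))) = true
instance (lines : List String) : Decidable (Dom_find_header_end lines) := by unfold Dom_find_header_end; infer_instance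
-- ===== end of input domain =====

-- B computes the same value by declarative queries (first h1 index, last breadcrumb index,
-- first non-header line after the title) instead of A's stateful flag-driven scan.
-- ===== PORT A =====
-- literal transliteration of A's single loop: state = (found_title, last_header_line), i = enumerate index
def find_header_end_go (lines : List String) (i : Nat) (found : Bool) (last : Int) : Int :=
  match lines with
  | [] => last + 1
  | l :: rest =>
    let stripped := PySem.Str.strip l
    if PySem.Str.startswith stripped ">" && !found then
      find_header_end_go rest (i + 1) found (Int.ofNat i)
    else if !found && PySem.Str.startswith stripped "# " then
      find_header_end_go rest (i + 1) true (Int.ofNat i)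
    else if found then
      if PySem.Str.startswith stripped ">" || PySem.Str.startswith stripped "### " || stripped == "" then
        find_header_end_go rest (i + 1) found (Int.ofNat i)
      else if stripped == "---" then Int.ofNat i + 1
      else last + 1  -- break, then 'return last_header_line + 1'
    else
      find_header_end_go rest (i + 1) found last

def find_header_end (lines : List String) : Int :=
  find_header_end_go lines 0 false 0

-- ===== PORT B =====
-- Source B's qual(s): line belongs to the header block after the title
def fhe_qual (s : String) : Bool :=
  PySem.Str.startswith s ">" || PySem.Str.startswith s "### " || s == ""

def find_header_end_alt (lines : List String) : Int :=
  let strips := lines.map PySem.Str.strip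
  -- t = next((i for i, s in enumerate(strips) if s.startswith('# ')), None)
  match strips.findIdx? (fun s => PySem.Str.startswith s "# ") with
  | none =>
    -- bc = [i for i, s in enumerate(strips) if s.startswith('>')]; (bc[-1] + 1) if bc else 1
    let bc := ((PySem.List.enumerate strips).filter
        (fun p => PySem.Str.startswith p.2 ">")).map (fun p => p.1)
    match bc.getLast? with
    | some j => j + 1
    | none => 1
  | some t =>
    -- tail = strips[t+1:]; k = next((k for k, s in enumerate(tail) if not qual(s)), None)
    let tail := strips.drop (t + 1)
    match tail.findIdx? (fun s => !fhe_qual s) with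
    | none => (lines.length : Int)
    | some k =>
      if tail[k]? = some "---" then (t : Int) + k + 2 else (t : Int) + k + 1

-- ===== PRECONDITION & SPEC =====
def Spec_find_header_end (lines : List String) (out : Int) : Prop := out = find_header_end_alt lines
instance (lines : List String) (out : Int) : Decidable (Spec_find_header_end lines out) := by unfold Spec_find_header_end; infer_instance

-- ===== CLAIM (what is proved, stated in full; the proofs are below) =====
def Claim_equal_find_header_end : Prop := ∀ (lines : List String), Dom_find_header_end lines → Spec_find_header_end lines (find_header_end lines)

-- ===== LEMMAS AND PROOFS =====

theorem sw_gt_not (s cs : String) (hne : PySem.Str.startswith s ">" = true)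
    (hcs : cs ∈ ["# ", "### "]) : PySem.Str.startswith s cs = false := by
  fin_cases hcs <;>
  · rw [PySem.Str.startswith_eq] at *
    rw [PySem.Chars.startswith_iff] at hne
    obtain ⟨t, ht⟩ := hne
    rw [show (">".toList) = ['>'] from rfl] at ht
    rw [← ht, Bool.eq_false_iff]
    intro hc
    rw [PySem.Chars.startswith_iff] at hc
    simp [List.cons_prefix_cons] at hc

-- one unfolding step of A's loop with found = true
theorem go_cons_true (l : String) (rest : List String) (i : Nat) (last : Int) :
    find_header_end_go (l :: rest) i true last =
      (if fhe_qual (PySem.Str.strip l) then find_header_end_go rest (i + 1) true (Int.ofNat i)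
       else if PySem.Str.strip l == "---" then Int.ofNat i + 1
       else last + 1) := by
  by_cases h3 : (PySem.Str.strip l == "") = true <;>
  simp [find_header_end_go, fhe_qual, h3]

-- one unfolding step of A's loop with found = false
theorem go_cons_false (l : String) (rest : List String) (i : Nat) (last : Int) :
    find_header_end_go (l :: rest) i false last =
      (if PySem.Str.startswith (PySem.Str.strip l) ">" then
         find_header_end_go rest (i + 1) false (Int.ofNat i)
       else if PySem.Str.startswith (PySem.Str.strip l) "# " then
         find_header_end_go rest (i + 1) true (Int.ofNat i)
       else find_header_end_go rest (i + 1) false last) := by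
  simp [find_header_end_go]

-- A's post-title loop equals B's first-non-qualifying search (invariant: last = title index i)
theorem go_true_char (lines : List String) : ∀ (i : Nat),
    find_header_end_go lines (i + 1) true (Int.ofNat i) =
      (match (lines.map PySem.Str.strip).findIdx? (fun s => !fhe_qual s) with
       | none => ((i + 1 + lines.length : Nat) : Int)
       | some k =>
         if (lines.map PySem.Str.strip)[k]? = some "---" then (i : Int) + k + 2
         else (i : Int) + k + 1) := by
  induction lines with
  | nil => intro i; simp [find_header_end_go]
  | cons l rest ih =>
    intro i
    rw [go_cons_true, List.map_cons, List.findIdx?_cons]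
    by_cases hq : fhe_qual (PySem.Str.strip l) = true
    · rw [if_pos hq, ih (i + 1)]
      simp only [hq, Bool.not_true, Bool.false_eq_true, if_false]
      cases hr : (rest.map PySem.Str.strip).findIdx? (fun s => !fhe_qual s) with
      | none => simp only [Option.map_none, List.length_cons]; push_cast [Int.ofNat_eq_natCast]; ring
      | some k =>
        simp only [Option.map_some, List.getElem?_cons_succ]
        split_ifs <;> push_cast [Int.ofNat_eq_natCast] <;> ring
    · have hq' : fhe_qual (PySem.Str.strip l) = false := by simpa using hq
      rw [if_neg hq]
      simp only [hq', Bool.not_false, if_true, List.getElem?_cons_zero]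
      by_cases hd : PySem.Str.strip l = "---"
      · rw [if_pos (by simpa using hd), if_pos (by rw [hd])]
        push_cast [Int.ofNat_eq_natCast]; ring
      · rw [if_neg (by simpa using hd), if_neg (by simpa using hd)]
        push_cast [Int.ofNat_eq_natCast]; ring

-- A's pre-title loop equals B's declarative queries (first h1, last breadcrumb, post-title search)
theorem go_false_char (lines : List String) : ∀ (i : Nat) (last : Int),
    find_header_end_go lines i false last =
      (match (lines.map PySem.Str.strip).findIdx? (fun s => PySem.Str.startswith s "# ") with
       | none =>
         match (((PySem.List.enumerate (lines.map PySem.Str.strip) (i : Int)).filter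
                  (fun p => PySem.Str.startswith p.2 ">")).map (fun p => p.1)).getLast? with
         | some j => j + 1
         | none => last + 1
       | some t =>
         match ((lines.map PySem.Str.strip).drop (t + 1)).findIdx? (fun s => !fhe_qual s) with
         | none => ((i + lines.length : Nat) : Int)
         | some k =>
           if ((lines.map PySem.Str.strip).drop (t + 1))[k]? = some "---" then
             ((i + t : Nat) : Int) + k + 2
           else ((i + t : Nat) : Int) + k + 1) := by
  induction lines with
  | nil => intro i last; simp [find_header_end_go]
  | cons l rest ih =>
    intro i last
    rw [go_cons_false, List.map_cons, List.findIdx?_cons, PySem.List.enumerate_cons]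
    have hcast : (i : Int) + 1 = ((i + 1 : Nat) : Int) := by push_cast; ring
    by_cases h1 : PySem.Str.startswith (PySem.Str.strip l) ">" = true
    · have hh : PySem.Str.startswith (PySem.Str.strip l) "# " = false :=
        sw_gt_not _ _ h1 (by simp)
      rw [if_pos h1, ih (i + 1) (Int.ofNat i)]
      simp only [hh, Bool.false_eq_true, if_false, List.filter_cons, h1, if_true,
        List.map_cons, List.getLast?_cons, hcast]
      cases hr : (rest.map PySem.Str.strip).findIdx? (fun s => PySem.Str.startswith s "# ") with
      | none =>
        simp only [Option.map_none]
        cases hb : (((PySem.List.enumerate (rest.map PySem.Str.strip) ((i + 1 : Nat) : Int)).filter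
            (fun p => PySem.Str.startswith p.2 ">")).map (fun p => p.1)).getLast? with
        | none => simp
        | some j => simp
      | some t =>
        simp only [Option.map_some, List.drop_succ_cons, List.length_cons]
        cases hr2 : List.findIdx? (fun s => !fhe_qual s)
            (List.drop (t + 1) (List.map PySem.Str.strip rest)) with
        | none => push_cast; ring
        | some k => simp only []; split_ifs <;> push_cast <;> ring
    · rw [if_neg h1]
      have h1' : PySem.Str.startswith (PySem.Str.strip l) ">" = false := by simpa using h1
      by_cases h2 : PySem.Str.startswith (PySem.Str.strip l) "# " = true
      · rw [if_pos h2, go_true_char rest i]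
        simp only [h2, if_true, List.drop_succ_cons, List.drop_zero, List.length_cons]
        cases hr : (rest.map PySem.Str.strip).findIdx? (fun s => !fhe_qual s) with
        | none => push_cast [Int.ofNat_eq_natCast]; ring
        | some k => simp only []; split_ifs <;> push_cast [Int.ofNat_eq_natCast] <;> ring
      · rw [if_neg h2, ih (i + 1) last]
        simp only [h2, Bool.false_eq_true, if_false, List.filter_cons, h1', hcast]
        cases hr : (rest.map PySem.Str.strip).findIdx? (fun s => PySem.Str.startswith s "# ") with
        | none => simp
        | some t =>
          simp only [Option.map_some, List.drop_succ_cons, List.length_cons]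
          cases hr2 : List.findIdx? (fun s => !fhe_qual s)
              (List.drop (t + 1) (List.map PySem.Str.strip rest)) with
          | none => push_cast; ring
          | some k => simp only []; split_ifs <;> push_cast <;> ring

-- ===== VERDICT (by name: the statement is the Claim_ definition above) =====
theorem find_header_end_spec : Claim_equal_find_header_end := by
  intro lines _
  unfold Spec_find_header_end find_header_end find_header_end_alt
  rw [go_false_char lines 0 0]
  simp only [Nat.cast_zero, zero_add]
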